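-- pv_equiv track=rewrite | github.com/tgrivel/CTiv3 | applicatie/logic/maak_matrix.py | pivot_table
-- ===== SOURCE A (Python) =====
-- def pivot_table(data, aggregeer_kolommen, waarde_kolom):
--     """Aggregeer kolom value_col over args.
--
--     @param aggregeer_kolommen De kolommen waarover geaggregeerd moet worden
--     @param waarde_kolom De kolom waarvan de waarde moet worden opgeslagen
--     """
--
--     index = [set() for _ in aggregeer_kolommen]
--     table = {}
--
--     for row in data:
--         key = tuple(row[kolom] for kolom in aggregeer_kolommen)
--
--         # Update indices
--         for i, k in enumerate(key):
--             index[i].add(k)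
--
--         # Update tabel
--         table[key] = table.get(key, 0) + row[waarde_kolom]
--
--     return index, table
-- ===== SOURCE B (Python) =====
-- def pivot_table(data, aggregeer_kolommen, waarde_kolom):
--     """Staged group-by: materialise the key/value columns first, then dedup the
--     keys and sum each group by rescanning, instead of one accumulating pass."""
--     keys = [tuple(row[kolom] for kolom in aggregeer_kolommen) for row in data]
--     values = [row[waarde_kolom] for row in data]
--     index = [set(key[i] for key in keys) for i in range(len(aggregeer_kolommen))]
--     distinct = []
--     for key in keys:
--         if key not in distinct:
--             distinct.append(key)
--     table = {key: sum(v for k, v in zip(keys, values) if k == key) for key in distinct}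
--     return index, table
-- ===== Notes on version B (the rewrite author's own statement) =====
-- stated objective: alternative
-- what changed: A makes one accumulating pass keeping a running-sum dict and per-row index updates; B is a staged group-by: it materialises the key and value columns, derives each index set by projection, dedups the keys, and computes each group's sum by rescanning the rows for that key.
import Mathlib
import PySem

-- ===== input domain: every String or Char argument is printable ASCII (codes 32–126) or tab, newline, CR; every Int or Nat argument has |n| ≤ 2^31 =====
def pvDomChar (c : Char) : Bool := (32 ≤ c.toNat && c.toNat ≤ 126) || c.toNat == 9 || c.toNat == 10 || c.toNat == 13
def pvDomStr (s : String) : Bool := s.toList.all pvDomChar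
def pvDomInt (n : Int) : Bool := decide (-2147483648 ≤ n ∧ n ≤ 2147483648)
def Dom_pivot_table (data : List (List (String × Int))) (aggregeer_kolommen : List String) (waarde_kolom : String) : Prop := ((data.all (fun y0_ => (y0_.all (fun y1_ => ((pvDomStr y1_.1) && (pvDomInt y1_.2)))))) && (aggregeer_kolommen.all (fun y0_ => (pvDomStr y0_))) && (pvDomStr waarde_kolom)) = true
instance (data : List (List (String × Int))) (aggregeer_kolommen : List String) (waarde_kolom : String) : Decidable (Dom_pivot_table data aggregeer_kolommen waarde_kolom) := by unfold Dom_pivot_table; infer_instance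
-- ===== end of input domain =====

-- B replaces A's single accumulating pass (running-sum dict + per-row index writes) by a
-- staged group-by: key/value columns first, index by projection, per-group sums by rescanning
-- (objective: alternative algorithm; return value proved equal).

-- ===== PORT A =====
-- row[c]; Pre_ guarantees that c is a key of row (Python raises KeyError otherwise)
def pvRowGet (row : List (String × Int)) (c : String) : Int :=
  PySem.Dict.getD (PySem.Dict.mk row) c 0

-- key = tuple(row[kolom] for kolom in aggregeer_kolommen) — shared by both ports
def pvKey (aggregeer_kolommen : List String) (row : List (String × Int)) : List Int :=
  aggregeer_kolommen.map (fun kolom => pvRowGet row kolom)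

-- for i, k in enumerate(key): index[i].add(k)   (in-place set write-back, Python-exact on i < len(index))
def pvIdxStep (idx : List (PySem.Set Int)) (key : List Int) : List (PySem.Set Int) :=
  (key.zipIdx 0).foldl (fun idx ik =>
    PySem.List.pySetD idx (ik.2 : Int)
      (PySem.Set.add (PySem.List.pyGetD idx (ik.2 : Int) PySem.Set.empty) ik.1)) idx

def pivot_table (data : List (List (String × Int))) (aggregeer_kolommen : List String) (waarde_kolom : String) : List (List Int) × (List (List Int × Int)) :=
  let res := data.foldl
    (fun (st : List (PySem.Set Int) × PySem.Dict (List Int) Int) row =>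
      (pvIdxStep st.1 (pvKey aggregeer_kolommen row),
       st.2.insert (pvKey aggregeer_kolommen row)
         (st.2.getD (pvKey aggregeer_kolommen row) 0 + pvRowGet row waarde_kolom)))
    (aggregeer_kolommen.map (fun _ => (PySem.Set.empty : PySem.Set Int)),
     (PySem.Dict.empty : PySem.Dict (List Int) Int))
  (res.1, res.2.items)

-- ===== PORT B =====
def pivot_table_alt (data : List (List (String × Int))) (aggregeer_kolommen : List String) (waarde_kolom : String) : List (List Int) × (List (List Int × Int)) :=
  -- keys = [tuple(row[kolom] for kolom in aggregeer_kolommen) for row in data]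
  let keys := data.map (fun row => pvKey aggregeer_kolommen row)
  -- values = [row[waarde_kolom] for row in data]
  let values := data.map (fun row => pvRowGet row waarde_kolom)
  -- index = [set(key[i] for key in keys) for i in range(len(aggregeer_kolommen))]
  let index := (PySem.List.pyRange 0 (aggregeer_kolommen.length : Int) 1).map (fun i =>
    PySem.Set.ofList (keys.map (fun key => PySem.List.pyGetD key i 0)))
  -- distinct = []; for key in keys: if key not in distinct: distinct.append(key)
  let distinct := keys.foldl (fun d key => PySem.Set.add d key) (PySem.Set.empty : PySem.Set (List Int))
  -- table = {key: sum(v for k, v in zip(keys, values) if k == key) for key in distinct}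
  let table := distinct.foldl (fun (t : PySem.Dict (List Int) Int) key =>
    t.insert key ((keys.zip values).foldl (fun s kv => if kv.1 == key then s + kv.2 else s) 0))
    (PySem.Dict.empty : PySem.Dict (List Int) Int)
  (index, table.items)

-- ===== PRECONDITION & SPEC =====
-- Pre_ excludes exactly the inputs on which Python A raises KeyError: a row missing one of the
-- aggregation columns or the value column.
def Pre_pivot_table (data : List (List (String × Int))) (aggregeer_kolommen : List String) (waarde_kolom : String) : Prop :=
  ∀ row ∈ data, (∀ c ∈ aggregeer_kolommen, (PySem.Dict.mk row).contains c = true) ∧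
    (PySem.Dict.mk row).contains waarde_kolom = true
instance (data : List (List (String × Int))) (aggregeer_kolommen : List String) (waarde_kolom : String) : Decidable (Pre_pivot_table data aggregeer_kolommen waarde_kolom) := by unfold Pre_pivot_table; infer_instance

def pvWitness_pivot_table : (List (List (String × Int))) × List String × String :=
  ([[("a", 1), ("v", 2)], [("a", 1), ("v", 3)], [("a", 2), ("v", 5)]], ["a"], "v")

def Spec_pivot_table (data : List (List (String × Int))) (aggregeer_kolommen : List String) (waarde_kolom : String) (out : List (List Int) × (List (List Int × Int))) : Prop := out = pivot_table_alt data aggregeer_kolommen waarde_kolom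
instance (data : List (List (String × Int))) (aggregeer_kolommen : List String) (waarde_kolom : String) (out : List (List Int) × (List (List Int × Int))) : Decidable (Spec_pivot_table data aggregeer_kolommen waarde_kolom out) := by unfold Spec_pivot_table; infer_instance

-- ===== CLAIM (what is proved, stated in full; the proofs are below) =====
def Claim_equal_pivot_table : Prop := ∀ (data : List (List (String × Int))) (aggregeer_kolommen : List String) (waarde_kolom : String), Dom_pivot_table data aggregeer_kolommen waarde_kolom → Pre_pivot_table data aggregeer_kolommen waarde_kolom → Spec_pivot_table data aggregeer_kolommen waarde_kolom (pivot_table data aggregeer_kolommen waarde_kolom)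

-- ===== LEMMAS AND PROOFS =====

lemma pv_getD_append {α : Type} (d : α) : ∀ (pre : List α) (r : α) (rest : List α),
    (pre ++ r :: rest).getD pre.length d = r := by
  intro pre
  induction pre with
  | nil => intro r rest; rfl
  | cons p pre ih => intro r rest; simp

-- the per-row index loop of A is pointwise: it zips the sets with the key
lemma pv_zipIdx_fold (key : List Int) : ∀ (pre rest : List (PySem.Set Int)),
    rest.length = key.length →
    (key.zipIdx pre.length).foldl (fun idx ik =>
        PySem.List.pySetD idx (ik.2 : Int)
          (PySem.Set.add (PySem.List.pyGetD idx (ik.2 : Int) PySem.Set.empty) ik.1)) (pre ++ rest)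
      = pre ++ List.zipWith PySem.Set.add rest key := by
  induction key with
  | nil =>
    intro pre rest h
    have hr : rest = [] := by cases rest <;> simp_all
    subst hr; simp [List.zipIdx]
  | cons k key ih =>
    intro pre rest h
    cases rest with
    | nil => simp at h
    | cons r rest =>
      have hz : (k :: key).zipIdx pre.length = (k, pre.length) :: key.zipIdx (pre.length + 1) := rfl
      rw [hz]
      dsimp only [List.foldl_cons]
      have hget : PySem.List.pyGetD (pre ++ r :: rest) ((pre.length : Nat) : Int) PySem.Set.empty = r := by
        rw [PySem.List.pyGetD_natCast]
        exact pv_getD_append _ pre r rest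
      have hset : PySem.List.pySetD (pre ++ r :: rest) ((pre.length : Nat) : Int) (PySem.Set.add r k)
          = pre ++ PySem.Set.add r k :: rest := by
        simp [PySem.List.pySetD, PySem.List.pySet?_natCast]
      rw [hget, hset]
      have hlen : rest.length = key.length := by
        simp only [List.length_cons] at h; omega
      have := ih (pre ++ [PySem.Set.add r k]) rest hlen
      simpa [List.append_assoc] using this

-- characterisation of A's index fold: column i is the first-occurrence set of the i-th key components
lemma pv_Aidx_char (aggs : List String) : ∀ (data : List (List (String × Int))) (idx : List (PySem.Set Int)),
    idx.length = aggs.length →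
    data.foldl (fun idx row => pvIdxStep idx (pvKey aggs row)) idx
      = (List.range aggs.length).map (fun i =>
          (data.map (pvKey aggs)).foldl (fun s k => PySem.Set.add s (k.getD i 0))
            (idx.getD i PySem.Set.empty)) := by
  intro data
  induction data with
  | nil =>
    intro idx h
    simp only [List.foldl_nil, List.map_nil]
    apply List.ext_getElem (by simp [h])
    intro j h1 h2
    have hj : j < aggs.length := by simpa using h2
    rw [List.getElem_map, List.getElem_range]
    rw [List.getD_eq_getElem?_getD, List.getElem?_eq_getElem (by omega : j < idx.length)]
    rfl
  | cons row data ih =>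
    intro idx h
    have hkey : (pvKey aggs row).length = aggs.length := by simp [pvKey]
    have hstep : pvIdxStep idx (pvKey aggs row) = List.zipWith PySem.Set.add idx (pvKey aggs row) := by
      have := pv_zipIdx_fold (pvKey aggs row) [] idx (by omega)
      simpa [pvIdxStep] using this
    simp only [List.foldl_cons, List.map_cons, hstep]
    rw [ih (List.zipWith PySem.Set.add idx (pvKey aggs row)) (by simp [List.length_zipWith, h, hkey])]
    apply List.map_congr_left
    intro i hi
    simp only [List.mem_range] at hi
    have h1 : i < idx.length := by omega
    have h2 : i < (pvKey aggs row).length := by omega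
    have h3 : i < (List.zipWith PySem.Set.add idx (pvKey aggs row)).length := by
      simp [List.length_zipWith]; omega
    have hseed : (List.zipWith PySem.Set.add idx (pvKey aggs row)).getD i PySem.Set.empty
        = PySem.Set.add (idx.getD i PySem.Set.empty) ((pvKey aggs row).getD i 0) := by
      rw [List.getD_eq_getElem?_getD, List.getElem?_eq_getElem h3, List.getElem_zipWith,
          List.getD_eq_getElem?_getD, List.getElem?_eq_getElem h1,
          List.getD_eq_getElem?_getD, List.getElem?_eq_getElem h2]
      rfl
    rw [hseed]

lemma pv_pyRange_map (n : Nat) :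
    PySem.List.pyRange 0 (n : Int) 1 = (List.range n).map (fun i : Nat => (i : Int)) := by
  simp [PySem.List.pyRange_zero_natCast]

lemma pv_init_getD (aggs : List String) (i : Nat) :
    (aggs.map (fun _ => (PySem.Set.empty : PySem.Set Int))).getD i PySem.Set.empty
      = PySem.Set.empty := by
  rw [List.getD_eq_getElem?_getD, List.getElem?_map]
  cases aggs[i]? <;> rfl

-- A's running sum at key k = the filtered sum B recomputes for k (specific to these two loops)
lemma pv_getD_fold_insert_add {κ : Type} [BEq κ] [LawfulBEq κ] (k : κ) :
    ∀ (l : List (κ × Int)) (d : PySem.Dict κ Int),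
    (l.foldl (fun d p => d.insert p.1 (d.getD p.1 0 + p.2)) d).getD k 0
      = d.getD k 0 + ((l.filter (fun p => p.1 == k)).map (·.2)).sum := by
  intro l
  induction l with
  | nil => intro d; simp
  | cons p l ih =>
    intro d
    simp only [List.foldl_cons, List.filter_cons]
    rw [ih]
    by_cases h : p.1 = k
    · subst h
      rw [PySem.Dict.getD_insert_self]
      simp [add_assoc]
    · rw [PySem.Dict.getD_insert_of_ne _ _ _ (fun he => h (Eq.symm he))]
      simp [beq_iff_eq, h]

-- B's conditional accumulation computes the filtered sum
lemma pv_fold_if_sum {κ : Type} [BEq κ] [LawfulBEq κ] (k : κ) :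
    ∀ (l : List (κ × Int)) (s : Int),
    l.foldl (fun s kv => if kv.1 == k then s + kv.2 else s) s
      = s + ((l.filter (fun p => p.1 == k)).map (·.2)).sum := by
  intro l
  induction l with
  | nil => intro s; simp
  | cons p l ih =>
    intro s
    simp only [List.foldl_cons, List.filter_cons]
    by_cases h : p.1 = k
    · simp only [h, beq_self_eq_true, if_true]
      rw [ih]; simp [add_assoc]
    · simp only [beq_iff_eq, h, if_false]
      rw [ih]

-- ===== VERDICT (by name: the statement is the Claim_ definition above) =====
theorem pivot_table_spec : Claim_equal_pivot_table := by
  intro data aggs wk _ _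
  unfold Spec_pivot_table pivot_table pivot_table_alt
  have hsplit : data.foldl
      (fun (st : List (PySem.Set Int) × PySem.Dict (List Int) Int) row =>
        (pvIdxStep st.1 (pvKey aggs row),
         st.2.insert (pvKey aggs row) (st.2.getD (pvKey aggs row) 0 + pvRowGet row wk)))
      (aggs.map (fun _ => (PySem.Set.empty : PySem.Set Int)),
       (PySem.Dict.empty : PySem.Dict (List Int) Int))
      = (data.foldl (fun idx row => pvIdxStep idx (pvKey aggs row))
           (aggs.map (fun _ => (PySem.Set.empty : PySem.Set Int))),
         data.foldl (fun t row =>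
             t.insert (pvKey aggs row) (t.getD (pvKey aggs row) 0 + pvRowGet row wk))
           (PySem.Dict.empty : PySem.Dict (List Int) Int)) :=
    PySem.List.foldl_prod_mk (fun idx row => pvIdxStep idx (pvKey aggs row))
      (fun (t : PySem.Dict (List Int) Int) row =>
        t.insert (pvKey aggs row) (t.getD (pvKey aggs row) 0 + pvRowGet row wk)) data _ _
  simp only [hsplit]
  refine Prod.ext ?_ ?_
  · -- index columns
    rw [pv_Aidx_char aggs data (aggs.map (fun _ => (PySem.Set.empty : PySem.Set Int))) (by simp)]
    simp only [pv_init_getD]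
    rw [pv_pyRange_map aggs.length, List.map_map]
    apply List.map_congr_left
    intro i hi
    simp only [Function.comp_apply, PySem.Set.ofList_eq_foldl, List.map_map, List.foldl_map,
      PySem.List.pyGetD_natCast]
    rfl
  · -- table items
    set keys' := data.map (pvKey aggs) with hk
    set S := fun key => ((keys'.zip (data.map (fun row => pvRowGet row wk))).foldl
        (fun s kv => if kv.1 == key then s + kv.2 else s) 0) with hS
    set Adict := data.foldl (fun t row =>
        t.insert (pvKey aggs row) (t.getD (pvKey aggs row) 0 + pvRowGet row wk))
      (PySem.Dict.empty : PySem.Dict (List Int) Int) with hA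
    have hnd : Adict.keys.Nodup := by
      rw [hA]
      exact PySem.Dict.nodup_keys_foldl_insert_key data (pvKey aggs)
        (fun t row => t.getD (pvKey aggs row) 0 + pvRowGet row wk) _
        PySem.Dict.nodup_keys_empty
    have hkeys : Adict.keys = PySem.Set.ofList keys' := by
      rw [hA]
      have h0 := PySem.Dict.keys_foldl_insert_key (ν := Int) data (pvKey aggs)
        (fun t row => t.getD (pvKey aggs row) 0 + pvRowGet row wk)
        (PySem.Dict.empty : PySem.Dict (List Int) Int)
      simpa [PySem.Set.update, PySem.Set.ofList_eq_foldl, PySem.Dict.keys, PySem.Dict.empty] using h0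
    have hitemsA : Adict.items = Adict.keys.map (fun k => (k, Adict.getD k 0)) :=
      PySem.Dict.items_eq_map_keys Adict hnd 0
    -- Source B's dedup loop builds set(keys') in first-occurrence order
    have hdistinct : keys'.foldl (fun d key => PySem.Set.add d key)
        (PySem.Set.empty : PySem.Set (List Int)) = PySem.Set.ofList keys' := by
      rw [PySem.Set.ofList_eq_foldl]; rfl
    -- B's dict comprehension over the distinct fresh keys appends its pairs in order
    have hitemsB := PySem.Dict.items_foldl_insert_fresh (PySem.Set.ofList keys')
      (fun key => key) S (PySem.Dict.empty : PySem.Dict (List Int) Int)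
      (by intro a _; simp) (by simp [PySem.Set.nodup_ofList])
    simp only [hdistinct]
    rw [hitemsB, hitemsA, hkeys]
    simp only [PySem.Dict.empty, List.nil_append]
    apply List.map_congr_left
    intro k _
    refine congrArg (Prod.mk k) ?_
    have hzip : keys'.zip (data.map (fun row => pvRowGet row wk))
        = data.map (fun row => (pvKey aggs row, pvRowGet row wk)) := by
      rw [hk, List.zip_map']
    have hAfold : Adict = (data.map (fun row => (pvKey aggs row, pvRowGet row wk))).foldl
        (fun d p => d.insert p.1 (d.getD p.1 0 + p.2))
        (PySem.Dict.empty : PySem.Dict (List Int) Int) := by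
      rw [hA, List.foldl_map]
    rw [hAfold, pv_getD_fold_insert_add, hS]
    simp only [hzip, pv_fold_if_sum]
    simp
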